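-- pv_equiv track=rewrite | github.com/ProIg-Chaa/cuda-oplib | python/experiments/FlashAttention/report.py | render_terminal_table
-- ===== SOURCE A (Python) =====
-- from typing import Iterable
--
-- MAX_NOTES_WIDTH = 36
--
-- RIGHT_ALIGNED_HEADERS = {"max_abs_diff", "avg_ms", "speedup_vs_ref"}
--
-- def _truncate(value: object, width: int) -> str:
--     text = str(value)
--     if len(text) <= width:
--         return text
--     if width <= 3:
--         return text[:width]
--     return text[: width - 3] + "..."
--
-- def render_terminal_table(rows: Iterable[dict]) -> str:
--     rows = list(rows)
--     if not rows:
--         return "No results."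
--
--     headers = [
--         "name",
--         "stage",
--         "dtype",
--         "correct",
--         "max_abs_diff",
--         "avg_ms",
--         "speedup_vs_ref",
--         "notes",
--     ]
--
--     widths = {header: len(header) for header in headers}
--     for row in rows:
--         for header in headers:
--             cell = str(row.get(header, ""))
--             if header == "notes":
--                 cell = _truncate(cell, MAX_NOTES_WIDTH)
--             widths[header] = max(widths[header], len(cell))
--
--     widths["notes"] = min(widths["notes"], MAX_NOTES_WIDTH)
--
--     def fmt_line(values):
--         formatted = []
--         for header in headers:
--             cell = values[header]
--             if header == "notes":
--                 cell = _truncate(cell, widths[header])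
--             else:
--                 cell = str(cell)
--
--             if header in RIGHT_ALIGNED_HEADERS:
--                 formatted.append(cell.rjust(widths[header]))
--             else:
--                 formatted.append(cell.ljust(widths[header]))
--         return " | ".join(formatted)
--
--     out = [fmt_line({h: h for h in headers})]
--     out.append(fmt_line({h: "-" * widths[h] for h in headers}))
--     for row in rows:
--         out.append(fmt_line({h: row.get(h, "") for h in headers}))
--     return "\n".join(out)
-- ===== SOURCE B (Python) =====
-- MAX_NOTES_WIDTH = 36
--
-- RIGHT_ALIGNED_HEADERS = {"max_abs_diff", "avg_ms", "speedup_vs_ref"}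
--
-- HEADERS = [
--     "name",
--     "stage",
--     "dtype",
--     "correct",
--     "max_abs_diff",
--     "avg_ms",
--     "speedup_vs_ref",
--     "notes",
-- ]
--
--
-- def _clip_notes(text: str) -> str:
--     if len(text) <= MAX_NOTES_WIDTH:
--         return text
--     return text[: MAX_NOTES_WIDTH - 3] + "..."
--
--
-- def render_terminal_table(rows) -> str:
--     rows = list(rows)
--     if not rows:
--         return "No results."
--
--     # Column-major rendering: each column is built and padded independently
--     # (header, dash rule, then its cells, each padded to the column's own width),
--     # and the output lines are obtained by transposing the columns.
--     columns = []
--     for h in HEADERS: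
--         cells = [str(r.get(h, "")) for r in rows]
--         if h == "notes":
--             cells = [_clip_notes(c) for c in cells]
--         w = max(len(c) for c in [h] + cells)
--         pad = str.rjust if h in RIGHT_ALIGNED_HEADERS else str.ljust
--         columns.append([pad(h, w), "-" * w] + [pad(c, w) for c in cells])
--     return "\n".join(" | ".join(line) for line in zip(*columns))
-- ===== Notes on version B (the rewrite author's own statement) =====
-- stated objective: alternative
-- what changed: B renders column-major: each column is built and padded independently with its own locally computed width (notes clipped once while collecting the column), and the output lines come from transposing the padded columns with zip(*columns), replacing A's global widths dict, its per-line fmt_line and the second truncation of notes.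
import Mathlib
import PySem

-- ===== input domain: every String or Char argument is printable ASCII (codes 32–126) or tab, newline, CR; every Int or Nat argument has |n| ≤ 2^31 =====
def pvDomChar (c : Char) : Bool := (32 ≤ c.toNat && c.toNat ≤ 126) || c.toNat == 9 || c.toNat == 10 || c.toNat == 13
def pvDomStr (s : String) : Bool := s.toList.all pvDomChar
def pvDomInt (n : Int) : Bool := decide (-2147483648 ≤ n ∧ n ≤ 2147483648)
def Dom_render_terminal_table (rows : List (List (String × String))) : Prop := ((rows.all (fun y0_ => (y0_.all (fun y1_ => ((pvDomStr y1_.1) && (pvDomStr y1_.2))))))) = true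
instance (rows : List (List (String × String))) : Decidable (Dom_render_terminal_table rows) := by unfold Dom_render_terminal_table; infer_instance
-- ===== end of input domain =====

-- B renders the table column-major (each column padded independently with its own
-- locally computed width, lines obtained by transposing the columns) instead of A's
-- global widths dict plus per-line formatter: an alternative decomposition, same output.

-- ===== PORT A =====
-- shared models of Python builtins (exact: str.ljust/rjust pad with spaces, never shorten)
def pyLjust (s : String) (w : Nat) : String :=
  String.ofList (s.toList ++ List.replicate (w - s.toList.length) ' ')

def pyRjust (s : String) (w : Nat) : String :=
  String.ofList (List.replicate (w - s.toList.length) ' ' ++ s.toList)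

-- row.get(h, "") : the Lean-side dict lookup (rows carry String values, str() is the identity)
def rowGet (row : List (String × String)) (h : String) : String :=
  (PySem.Dict.mk row).getD h ""

def headersA : List String :=
  ["name", "stage", "dtype", "correct", "max_abs_diff", "avg_ms", "speedup_vs_ref", "notes"]

-- RIGHT_ALIGNED_HEADERS (a Python set; only membership is ever used)
def rightAligned : PySem.Set String := PySem.Set.ofList ["max_abs_diff", "avg_ms", "speedup_vs_ref"]

-- _truncate(value, width); widths are Python ints that are always ≥ 0 here, kept as Nat
def pyTrunc (text : String) (width : Nat) : String :=
  if text.toList.length ≤ width then text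
  else if width ≤ 3 then String.ofList (text.toList.take width)
  else String.ofList (text.toList.take (width - 3) ++ "...".toList)

-- widths = {header: len(header) for header in headers}
def widthsInit : PySem.Dict String Nat :=
  headersA.foldl (fun d h => d.insert h h.toList.length) PySem.Dict.empty

-- the double loop updating widths[header] (widths[header] is always present; getD 0 is never the default)
def widthsScan (rows : List (List (String × String))) : PySem.Dict String Nat :=
  rows.foldl
    (fun d row =>
      headersA.foldl
        (fun d h =>
          let cell := rowGet row h
          let cell := if h == "notes" then pyTrunc cell 36 else cell
          d.insert h (max (d.getD h 0) cell.toList.length))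
        d)
    widthsInit

-- widths["notes"] = min(widths["notes"], MAX_NOTES_WIDTH)
def widthsA (rows : List (List (String × String))) : PySem.Dict String Nat :=
  (widthsScan rows).insert "notes" (min ((widthsScan rows).getD "notes" 0) 36)

-- fmt_line(values); the Python values-dict is passed as its lookup function
def fmtLine (widths : PySem.Dict String Nat) (values : String → String) : String :=
  PySem.Str.join " | "
    (headersA.foldl
      (fun acc h =>
        let cell := values h
        let cell := if h == "notes" then pyTrunc cell (widths.getD h 0) else cell
        acc ++ [if rightAligned.contains h then pyRjust cell (widths.getD h 0)
                else pyLjust cell (widths.getD h 0)])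
      [])

def render_terminal_table (rows : List (List (String × String))) : String :=
  if rows = [] then "No results."
  else
    let widths := widthsA rows
    let out := [fmtLine widths (fun h => h)]
    let out := out ++ [fmtLine widths (fun h => String.ofList (List.replicate (widths.getD h 0) '-'))]
    let out := rows.foldl (fun out row => out ++ [fmtLine widths (fun h => rowGet row h)]) out
    PySem.Str.join "\n" out

-- ===== PORT B =====
def headersB : List String :=
  ["name", "stage", "dtype", "correct", "max_abs_diff", "avg_ms", "speedup_vs_ref", "notes"]

-- _clip_notes
def clipNotes (text : String) : String :=
  if text.toList.length ≤ 36 then text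
  else String.ofList (text.toList.take (36 - 3) ++ "...".toList)

-- zip(*columns): emit the tuple of heads while every column is nonempty (stops at the
-- shortest column, exactly Python's zip); structural recursion on the first column
def pyZipAux (c : List String) (rest : List (List String)) : List (List String) :=
  match c with
  | [] => []
  | x :: xs =>
      if rest.all (fun c => !c.isEmpty)
      then (x :: rest.map (fun c => c.headD "")) :: pyZipAux xs (rest.map List.tail)
      else []

def pyZipN (cols : List (List String)) : List (List String) :=
  match cols with
  | [] => []
  | c :: cs => pyZipAux c cs

-- one fully rendered column: header cell, dash rule, then the padded data cells
def colOf (rows : List (List (String × String))) (h : String) : List String :=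
  let cells := rows.map (fun r => rowGet r h)
  let cells := if h == "notes" then cells.map clipNotes else cells
  let w := (PySem.List.max? ((h :: cells).map (fun s => s.toList.length)) (id : Nat → Nat)).getD 0
  let pad := if rightAligned.contains h then pyRjust else pyLjust
  [pad h w, String.ofList (List.replicate w '-')] ++ cells.map (fun c => pad c w)

def render_terminal_table_alt (rows : List (List (String × String))) : String :=
  if rows = [] then "No results."
  else
    let columns := headersB.map (colOf rows)
    PySem.Str.join "\n" ((pyZipN columns).map (fun line => PySem.Str.join " | " line))

-- ===== PRECONDITION & SPEC =====
def Spec_render_terminal_table (rows : List (List (String × String))) (out : String) : Prop := out = render_terminal_table_alt rows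
instance (rows : List (List (String × String))) (out : String) : Decidable (Spec_render_terminal_table rows out) := by unfold Spec_render_terminal_table; infer_instance

-- ===== CLAIM (what is proved, stated in full; the proofs are below) =====
def Claim_equal_render_terminal_table : Prop := ∀ (rows : List (List (String × String))), Dom_render_terminal_table rows → Spec_render_terminal_table rows (render_terminal_table rows)

-- ===== LEMMAS AND PROOFS =====

-- the final cell string of a data row in column h
def cellOf (row : List (String × String)) (h : String) : String :=
  if h == "notes" then clipNotes (rowGet row h) else rowGet row h

-- the width A's scan assigns to header h, written as a per-column fold
def colW (rows : List (List (String × String))) (h : String) : Nat :=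
  rows.foldl (fun m row => max m ((cellOf row h).toList.length)) h.toList.length

-- the padding function of column h
def padOf (h : String) : String → Nat → String :=
  if rightAligned.contains h then pyRjust else pyLjust

theorem pyTrunc_36_eq_clipNotes (t : String) : pyTrunc t 36 = clipNotes t := by
  unfold pyTrunc clipNotes
  split_ifs with h1 h2 <;> first | rfl | omega

theorem clipNotes_len_le (t : String) : (clipNotes t).toList.length ≤ 36 := by
  unfold clipNotes
  split_ifs with h1
  · exact h1
  · simp [String.toList_ofList]

theorem cellOf_len_le (row : List (String × String)) :
    (cellOf row "notes").toList.length ≤ 36 := by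
  simpa [cellOf] using clipNotes_len_le (rowGet row "notes")

-- A's inner loop over the 8 headers, seen through one key
theorem inner_getD (d : PySem.Dict String Nat) (row : List (String × String))
    (h : String) (hm : h ∈ headersA) :
    (headersA.foldl
      (fun d h =>
        let cell := rowGet row h
        let cell := if h == "notes" then pyTrunc cell 36 else cell
        d.insert h (max (d.getD h 0) cell.toList.length)) d).getD h 0
      = max (d.getD h 0) ((cellOf row h).toList.length) := by
  simp only [headersA, List.mem_cons, List.not_mem_nil, or_false] at hm
  rcases hm with rfl | rfl | rfl | rfl | rfl | rfl | rfl | rfl <;>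
    simp [headersA, cellOf, pyTrunc_36_eq_clipNotes, PySem.Dict.getD_insert]

theorem scan_getD (rows : List (List (String × String))) (h : String) (hm : h ∈ headersA) :
    ∀ d : PySem.Dict String Nat,
      (rows.foldl
        (fun d row =>
          headersA.foldl
            (fun d h =>
              let cell := rowGet row h
              let cell := if h == "notes" then pyTrunc cell 36 else cell
              d.insert h (max (d.getD h 0) cell.toList.length)) d) d).getD h 0
        = rows.foldl (fun m row => max m ((cellOf row h).toList.length)) (d.getD h 0) := by
  induction rows with
  | nil => intro d; rfl
  | cons r rs ih =>
      intro d
      simp only [List.foldl_cons]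
      rw [ih, inner_getD d r h hm]

theorem init_getD (h : String) (hm : h ∈ headersA) :
    widthsInit.getD h 0 = h.toList.length := by
  simp only [headersA, List.mem_cons, List.not_mem_nil, or_false] at hm
  rcases hm with rfl | rfl | rfl | rfl | rfl | rfl | rfl | rfl <;> decide

theorem widthsScan_getD (rows : List (List (String × String))) (h : String) (hm : h ∈ headersA) :
    (widthsScan rows).getD h 0 = colW rows h := by
  unfold widthsScan colW
  rw [scan_getD rows h hm widthsInit, init_getD h hm]

theorem foldl_max_le {l : List (List (String × String))} {a c : Nat}
    (hs : ∀ x ∈ l, (cellOf x "notes").toList.length ≤ c) (ha : a ≤ c) :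
    l.foldl (fun m row => max m ((cellOf row "notes").toList.length)) a ≤ c := by
  induction l generalizing a with
  | nil => exact ha
  | cons x xs ih =>
      simp only [List.foldl_cons]
      exact ih (fun y hy => hs y (List.mem_cons_of_mem _ hy))
        (max_le ha (hs x (List.mem_cons_self)))

theorem colW_notes_le (rows : List (List (String × String))) : colW rows "notes" ≤ 36 := by
  unfold colW
  exact foldl_max_le (fun x _ => cellOf_len_le x) (by decide)

theorem widthsA_getD (rows : List (List (String × String))) (h : String) (hm : h ∈ headersA) :
    (widthsA rows).getD h 0 = colW rows h := by
  unfold widthsA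
  rw [PySem.Dict.getD_insert]
  by_cases hn : h = "notes"
  · subst hn
    rw [if_pos rfl, widthsScan_getD rows _ hm]
    exact Nat.min_eq_left (colW_notes_le rows)
  · rw [if_neg hn, widthsScan_getD rows h hm]

theorem colW_ge_header (rows : List (List (String × String))) (h : String) :
    h.toList.length ≤ colW rows h := by
  unfold colW
  rw [show (fun m row => max m ((cellOf row h).toList.length))
        = fun m row => max m ((fun r => (cellOf r h).toList.length) row) from rfl,
      ← List.foldl_map]
  exact (PySem.List.le_foldl_max _ _).1

theorem colW_ge_cell (rows : List (List (String × String))) (h : String)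
    (row : List (String × String)) (hr : row ∈ rows) :
    (cellOf row h).toList.length ≤ colW rows h := by
  unfold colW
  rw [show (fun m row => max m ((cellOf row h).toList.length))
        = fun m row => max m ((fun r => (cellOf r h).toList.length) row) from rfl,
      ← List.foldl_map]
  exact (PySem.List.le_foldl_max _ _).2 _ (List.mem_map_of_mem hr)

theorem cellOf_notes (row : List (String × String)) :
    cellOf row "notes" = clipNotes (rowGet row "notes") := by
  simp [cellOf]

theorem clipNotes_len_eq {t : String} (hl : ¬ t.toList.length ≤ 36) :
    (clipNotes t).toList.length = 36 := by
  rw [clipNotes, if_neg hl]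
  have hl' : ¬ t.length ≤ 36 := by simpa using hl
  simp [String.toList_ofList]
  omega

-- the notes cell of a data row: A's second truncation (to the final width) is B's single clip
theorem trunc_final_eq_clip (rows : List (List (String × String)))
    (row : List (String × String)) (hr : row ∈ rows) :
    pyTrunc (rowGet row "notes") (colW rows "notes") = clipNotes (rowGet row "notes") := by
  by_cases hl : (rowGet row "notes").toList.length ≤ 36
  · have hcell : cellOf row "notes" = rowGet row "notes" := by
      rw [cellOf_notes, clipNotes, if_pos hl]
    have hW : (rowGet row "notes").toList.length ≤ colW rows "notes" := by
      have := colW_ge_cell rows "notes" row hr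
      rwa [hcell] at this
    rw [clipNotes, if_pos hl, pyTrunc, if_pos hW]
  · have hcell : (cellOf row "notes").toList.length = 36 := by
      rw [cellOf_notes]; exact clipNotes_len_eq hl
    have hW : colW rows "notes" = 36 :=
      le_antisymm (colW_notes_le rows) (hcell ▸ colW_ge_cell rows "notes" row hr)
    rw [hW, pyTrunc_36_eq_clipNotes]

-- a header-line / separator-line cell is never shortened by A's truncation
theorem trunc_noop {t : String} {w : Nat} (hl : t.toList.length ≤ w) : pyTrunc t w = t := by
  rw [pyTrunc, if_pos hl]

theorem mk_replicate_len (w : Nat) : (String.ofList (List.replicate w '-')).toList.length = w := by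
  simp

-- A's fmt_line as a map over the headers
theorem fmtLine_eq_map (widths : PySem.Dict String Nat) (values : String → String) :
    fmtLine widths values
      = PySem.Str.join " | "
          (headersA.map (fun h =>
            let cell := values h
            let cell := if h == "notes" then pyTrunc cell (widths.getD h 0) else cell
            if rightAligned.contains h then pyRjust cell (widths.getD h 0)
            else pyLjust cell (widths.getD h 0))) := by
  unfold fmtLine
  rw [PySem.List.foldl_append_singleton_eq_map]
  rfl

theorem cellOf_of_ne (row : List (String × String)) {h : String} (hn : h ≠ "notes") :
    cellOf row h = rowGet row h := by
  simp [cellOf, hn]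

-- Python's max over a nonempty list of Nats is the left fold of Nat.max
theorem max?_cons_some (l : List Nat) :
    ∀ a : Nat, PySem.List.max? (a :: l) (id : Nat → Nat) = some (l.foldl max a) := by
  induction l with
  | nil => intro a; rfl
  | cons x xs ih =>
      intro a
      have step : PySem.List.max? (a :: x :: xs) (id : Nat → Nat)
          = PySem.List.max? (max a x :: xs) (id : Nat → Nat) := by
        unfold PySem.List.max?
        dsimp only [List.foldl_cons]
        congr 1
        simp only [id_eq]
        split_ifs with h <;> exact congrArg some (by omega)
      rw [step, ih (max a x)]
      rfl

theorem max?_cons_nat (a : Nat) (l : List Nat) :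
    (PySem.List.max? (a :: l) (id : Nat → Nat)).getD 0 = l.foldl max a := by
  rw [max?_cons_some]
  rfl

-- B's column h in explicit head/rule/cells shape, its local width being colW
theorem colOf_eq (rows : List (List (String × String))) (h : String) (hm : h ∈ headersA) :
    colOf rows h
      = padOf h h (colW rows h)
        :: String.ofList (List.replicate (colW rows h) '-')
        :: rows.map (fun r => padOf h (cellOf r h) (colW rows h)) := by
  have hcells : (if h == "notes"
        then (rows.map (fun r => rowGet r h)).map clipNotes
        else rows.map (fun r => rowGet r h))
      = rows.map (fun r => cellOf r h) := by
    by_cases hn : h = "notes"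
    · subst hn
      simp [List.map_map, cellOf, Function.comp]
    · simp only [if_neg (by simp [hn] : ¬ ((h == "notes") = true))]
      exact List.map_congr_left (fun r _ => (cellOf_of_ne r hn).symm)
  have hw : (PySem.List.max?
        ((h :: rows.map (fun r => cellOf r h)).map (fun s => s.toList.length))
        (id : Nat → Nat)).getD 0 = colW rows h := by
    rw [List.map_cons, max?_cons_nat, List.map_map, List.foldl_map]
    rfl
  unfold colOf padOf
  dsimp only
  rw [hcells, hw]
  simp [List.map_map]

-- transpose of columns that all start with a cell: that cell row comes off first
theorem zipN_map_cons (l : List String) (hl : l ≠ [])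
    (x : String → String) (f : String → List String) :
    pyZipN (l.map (fun h => x h :: f h)) = l.map x :: pyZipN (l.map f) := by
  cases l with
  | nil => exact absurd rfl hl
  | cons a l' =>
      simp only [List.map_cons]
      show pyZipAux (x a :: f a) (l'.map (fun h => x h :: f h)) = _
      rw [pyZipAux]
      have hcond : (l'.map (fun h => x h :: f h)).all (fun c => !c.isEmpty) = true := by
        simp [List.all_map]
      rw [if_pos hcond]
      simp only [List.map_map]
      rfl

-- transpose of per-row columns is the row-major grid
theorem zipN_map_rows (l : List String) (hl : l ≠ [])
    (rows : List (List (String × String))) (C : List (String × String) → String → String) :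
    pyZipN (l.map (fun h => rows.map (fun r => C r h)))
      = rows.map (fun r => l.map (C r)) := by
  induction rows with
  | nil =>
      cases l with
      | nil => exact absurd rfl hl
      | cons a l' => rfl
  | cons r rs ih =>
      simp only [List.map_cons]
      rw [show l.map (fun h => C r h :: rs.map (fun r' => C r' h))
            = l.map (fun h => (fun h => C r h) h :: (fun h => rs.map (fun r' => C r' h)) h) from rfl,
          zipN_map_cons l hl, ih]

-- one rendered line of A as the padded-cell map over the headers
theorem fmt_eq_join (rows : List (List (String × String))) (values c : String → String)
    (hc : ∀ h ∈ headersA,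
      (if h == "notes" then pyTrunc (values h) (colW rows h) else values h) = c h) :
    fmtLine (widthsA rows) values
      = PySem.Str.join " | " (headersA.map (fun h => padOf h (c h) (colW rows h))) := by
  rw [fmtLine_eq_map]
  refine congrArg _ (List.map_congr_left ?_)
  intro h hm
  dsimp only
  rw [widthsA_getD rows h hm, hc h hm]
  unfold padOf
  split_ifs <;> rfl

theorem headersA_ne : headersA ≠ [] := by unfold headersA; exact List.cons_ne_nil _ _

-- padding a string already at the target width is the identity
theorem pad_noop (h s : String) (w : Nat) (hl : s.toList.length = w) : padOf h s w = s := by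
  subst hl
  unfold padOf pyLjust pyRjust
  split_ifs <;> simp

-- ===== VERDICT (by name: the statement is the Claim_ definition above) =====
theorem render_terminal_table_spec : Claim_equal_render_terminal_table := by
  unfold Claim_equal_render_terminal_table
  intro rows _
  unfold Spec_render_terminal_table
  by_cases hnil : rows = []
  · simp [render_terminal_table, render_terminal_table_alt, hnil]
  · unfold render_terminal_table render_terminal_table_alt
    rw [if_neg hnil, if_neg hnil]
    dsimp only
    -- B's transposed grid
    rw [show headersB = headersA from rfl,
        List.map_congr_left (fun h hm => colOf_eq rows h hm)]
    have h1 : pyZipN (headersA.map (fun h =>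
          padOf h h (colW rows h)
            :: String.ofList (List.replicate (colW rows h) '-')
            :: rows.map (fun r => padOf h (cellOf r h) (colW rows h))))
        = headersA.map (fun h => padOf h h (colW rows h))
          :: pyZipN (headersA.map (fun h =>
              String.ofList (List.replicate (colW rows h) '-')
                :: rows.map (fun r => padOf h (cellOf r h) (colW rows h)))) :=
      zipN_map_cons headersA headersA_ne (fun h => padOf h h (colW rows h))
        (fun h => String.ofList (List.replicate (colW rows h) '-')
          :: rows.map (fun r => padOf h (cellOf r h) (colW rows h)))
    have h2 : pyZipN (headersA.map (fun h =>
          String.ofList (List.replicate (colW rows h) '-')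
            :: rows.map (fun r => padOf h (cellOf r h) (colW rows h))))
        = headersA.map (fun h => String.ofList (List.replicate (colW rows h) '-'))
          :: pyZipN (headersA.map (fun h =>
              rows.map (fun r => padOf h (cellOf r h) (colW rows h)))) :=
      zipN_map_cons headersA headersA_ne (fun h => String.ofList (List.replicate (colW rows h) '-'))
        (fun h => rows.map (fun r => padOf h (cellOf r h) (colW rows h)))
    have h3 : pyZipN (headersA.map (fun h =>
          rows.map (fun r => padOf h (cellOf r h) (colW rows h))))
        = rows.map (fun r => headersA.map (fun h => padOf h (cellOf r h) (colW rows h))) :=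
      zipN_map_rows headersA headersA_ne rows (fun r h => padOf h (cellOf r h) (colW rows h))
    rw [h1, h2, h3]
    -- A's line list
    simp only [PySem.List.foldl_append_singleton_eq_map, List.cons_append, List.nil_append,
      List.map_cons, List.map_map]
    refine congrArg _ ?_
    simp only [List.cons.injEq]
    refine ⟨?_, ?_, ?_⟩
    · -- header line
      refine fmt_eq_join rows (fun h => h) (fun h => h) ?_
      intro h hm
      by_cases hn : h = "notes"
      · subst hn
        simp only [beq_self_eq_true, if_true]
        exact trunc_noop (colW_ge_header rows "notes")
      · simp [hn]
    · -- separator line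
      rw [fmt_eq_join rows
            (fun h => String.ofList (List.replicate ((widthsA rows).getD h 0) '-'))
            (fun h => String.ofList (List.replicate (colW rows h) '-')) ?hsep]
      case hsep =>
        intro h hm
        dsimp only
        rw [widthsA_getD rows h hm]
        by_cases hn : h = "notes"
        · subst hn
          simp only [beq_self_eq_true, if_true]
          exact trunc_noop (le_of_eq (mk_replicate_len _))
        · simp [hn]
      exact congrArg _ (List.map_congr_left (fun h _ => pad_noop h _ _ (mk_replicate_len _)))
    · -- data lines
      refine List.map_congr_left ?_
      intro row hr
      refine fmt_eq_join rows (fun h => rowGet row h) (cellOf row) ?_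
      intro h hm
      by_cases hn : h = "notes"
      · subst hn
        simp only [beq_self_eq_true, if_true]
        rw [trunc_final_eq_clip rows row hr, ← cellOf_notes]
      · simp only [if_neg (by simp [hn] : ¬ ((h == "notes") = true))]
        exact (cellOf_of_ne row hn).symm
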